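-- pv_equiv track=rewrite | github.com/t-tsekov/codefights-solutions | arcade/the-core/lab-of-transformations/cipher26.py | cipher26
-- ===== SOURCE A (Python) =====
-- def cipher26(message):
--     message = list(message)
--     currsum = 0
--     outmessage = ""
--     while message:
--         x = message.pop(0)
--         outmessage += chr(97+(ord(x)-97-currsum)%26)
--         currsum += ord(outmessage[-1])-97
--     return outmessage
-- ===== SOURCE B (Python) =====
-- def cipher26(message):
--     return "".join(chr(97 + (ord(c) - ord(p)) % 26)
--                    for p, c in zip("a" + message, message))
-- ===== Notes on version B (the rewrite author's own statement) =====
-- stated objective: simpler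
-- what changed: Replaced the stateful running-sum loop with pop(0) and string concatenation by a stateless pairwise transform: zip the message with itself shifted by one (prefixed with 'a') and map each pair to chr(97 + (ord(c) - ord(p)) % 26), since the running sum collapses mod 26 to ord(previous char) - 97.
import Mathlib
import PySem

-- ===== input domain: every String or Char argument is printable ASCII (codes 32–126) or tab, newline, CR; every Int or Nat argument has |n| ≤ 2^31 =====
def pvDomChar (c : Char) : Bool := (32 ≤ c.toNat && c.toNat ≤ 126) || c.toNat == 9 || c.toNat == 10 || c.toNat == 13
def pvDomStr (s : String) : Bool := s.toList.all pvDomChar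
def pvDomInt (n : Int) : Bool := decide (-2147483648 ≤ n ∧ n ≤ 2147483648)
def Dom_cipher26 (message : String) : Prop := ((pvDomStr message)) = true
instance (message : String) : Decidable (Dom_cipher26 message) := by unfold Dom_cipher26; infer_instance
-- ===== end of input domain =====

-- B replaces A's stateful running-sum/pop(0) loop by a stateless pairwise zip of the
-- message with its shift-by-one ('a'-prefixed): simpler, no maintained state.

-- ===== PORT A =====
-- A's while loop popping the list front: state (currsum, outmessage); outmessage[-1] is the char just appended.
def cipher26Loop (ms : List Char) (currsum : Int) (out : List Char) : List Char :=
  match ms with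
  | [] => out
  | x :: rest =>
    let c := Char.ofNat (97 + ((((x.toNat : Int)) - 97 - currsum) % 26)).toNat
    cipher26Loop rest (currsum + ((c.toNat : Int) - 97)) (out ++ [c])

def cipher26 (message : String) : String :=
  String.mk (cipher26Loop message.toList 0 [])

-- ===== PORT B =====
-- zip("a" + message, message) mapped through the pairwise-difference formula.
def cipher26_alt (message : String) : String :=
  String.mk (List.zipWith
    (fun p c => Char.ofNat (97 + (((c.toNat : Int) - (p.toNat : Int)) % 26)).toNat)
    ('a' :: message.toList) message.toList)

-- ===== PRECONDITION & SPEC =====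
def Spec_cipher26 (message : String) (out : String) : Prop := out = cipher26_alt message
instance (message : String) (out : String) : Decidable (Spec_cipher26 message out) := by unfold Spec_cipher26; infer_instance

-- ===== CLAIM (what is proved, stated in full; the proofs are below) =====
def Claim_equal_cipher26 : Prop := ∀ (message : String), Dom_cipher26 message → Spec_cipher26 message (cipher26 message)

-- ===== LEMMAS AND PROOFS =====

-- Loop invariant: when currsum ≡ ord(prev) - 97 (mod 26), A's loop appends exactly
-- B's zip of (prev :: ms) with ms.
theorem cipher26Loop_eq (ms : List Char) (s : Int) (prev : Char) (out : List Char)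
    (h : (s - ((prev.toNat : Int) - 97)) % 26 = 0) :
    cipher26Loop ms s out = out ++ List.zipWith
      (fun p c => Char.ofNat (97 + (((c.toNat : Int) - (p.toNat : Int)) % 26)).toNat)
      (prev :: ms) ms := by
  induction ms generalizing s prev out with
  | nil => simp [cipher26Loop]
  | cons x rest ih =>
    have hm : (((x.toNat : Int)) - 97 - s) % 26 = (((x.toNat : Int)) - (prev.toNat : Int)) % 26 := by
      omega
    have hge : 0 ≤ (((x.toNat : Int)) - (prev.toNat : Int)) % 26 := Int.emod_nonneg _ (by norm_num)
    have hlt : (((x.toNat : Int)) - (prev.toNat : Int)) % 26 < 26 := Int.emod_lt_of_pos _ (by norm_num)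
    have hv : ((97 + (((x.toNat : Int)) - (prev.toNat : Int)) % 26).toNat).isValidChar :=
      Or.inl (by omega)
    have htn : ((Char.ofNat (97 + (((x.toNat : Int)) - (prev.toNat : Int)) % 26).toNat).toNat : Int)
        = 97 + (((x.toNat : Int)) - (prev.toNat : Int)) % 26 := by
      rw [Char.toNat_ofNat, if_pos hv]; omega
    simp only [cipher26Loop, List.zipWith, hm]
    rw [htn, ih _ x _ (by omega)]
    simp

-- ===== VERDICT (by name: the statement is the Claim_ definition above) =====
theorem cipher26_spec : Claim_equal_cipher26 := by
  intro message _
  unfold Spec_cipher26 cipher26 cipher26_alt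
  rw [cipher26Loop_eq _ _ 'a' _ (by decide)]
  simp
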